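-- pv_equiv track=rewrite | github.com/360wcui/enae_788v_final_project | mid_term.py | subRoutine
-- ===== SOURCE A (Python) =====
-- def subRoutine(m):
--     j = 0
--     t = m
--     while j < m:
--         for l in range(m, j - 1, -1):
--             t += j
--         j += 1
--     return t
-- ===== SOURCE B (Python) =====
-- def subRoutine(m):
--     # Closed form: t = m + sum_{j=0}^{m-1} j*(m-j+1) = m + m*(m-1)*(m+4)//6
--     if m <= 0:
--         return m
--     return m + m * (m - 1) * (m + 4) // 6
-- ===== Notes on version B (the rewrite author's own statement) =====
-- stated objective: faster
-- what changed: Replaced the quadratic nested while/for accumulation by the closed-form polynomial m + m*(m-1)*(m+4)//6 (derived from sum j*(m-j+1) for j in 0..m-1).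
import Mathlib
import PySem

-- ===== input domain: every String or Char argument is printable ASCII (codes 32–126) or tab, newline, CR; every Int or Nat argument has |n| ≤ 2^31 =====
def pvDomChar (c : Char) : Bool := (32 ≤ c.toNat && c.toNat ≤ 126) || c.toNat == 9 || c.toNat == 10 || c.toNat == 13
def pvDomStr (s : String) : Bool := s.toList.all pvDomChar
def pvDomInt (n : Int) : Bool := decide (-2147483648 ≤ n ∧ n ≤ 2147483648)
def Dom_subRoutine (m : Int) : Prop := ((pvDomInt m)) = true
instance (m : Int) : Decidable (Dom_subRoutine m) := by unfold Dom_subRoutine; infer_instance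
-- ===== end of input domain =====

-- B replaces A's quadratic nested-loop accumulation by the closed-form polynomial m + m*(m-1)*(m+4)//6 (asymptotically faster).


-- ===== PORT A =====
-- while j < m: (inner for l in range(m, j-1, -1): t += j); j += 1
def subRoutineLoop (m : Int) (fuel : Nat) (j t : Int) : Int :=
  match fuel with
  | 0 => t
  | fuel + 1 =>
    if j < m then
      subRoutineLoop m fuel (j + 1)
        ((PySem.List.pyRange m (j - 1) (-1)).foldl (fun acc _ => acc + j) t)
    else t

def subRoutine (m : Int) : Int := subRoutineLoop m m.toNat 0 m

-- ===== PORT B =====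
def subRoutine_alt (m : Int) : Int :=
  if m ≤ 0 then m
  else m + PySem.Int.floordiv (m * (m - 1) * (m + 4)) 6

-- ===== PRECONDITION & SPEC =====
def Spec_subRoutine (m : Int) (out : Int) : Prop := out = subRoutine_alt m
instance (m : Int) (out : Int) : Decidable (Spec_subRoutine m out) := by unfold Spec_subRoutine; infer_instance

-- ===== CLAIM (what is proved, stated in full; the proofs are below) =====
def Claim_equal_subRoutine : Prop := ∀ (m : Int), Dom_subRoutine m → Spec_subRoutine m (subRoutine m)

-- ===== LEMMAS AND PROOFS =====

theorem foldl_add_const (j : Int) (l : List Int) (t : Int) :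
    l.foldl (fun acc _ => acc + j) t = t + j * l.length := by
  induction l generalizing t with
  | nil => simp
  | cons x xs ih => simp [List.foldl, ih]; ring

theorem subRoutineLoop_invariant (m : Int) (fuel : Nat) (j t : Int)
    (h0 : 0 ≤ j) (hjm : j + (fuel : Int) = m) :
    6 * (subRoutineLoop m fuel j t - t)
      = m * (m - 1) * (m + 4) - j * (j - 1) * (3 * m - 2 * j + 4) := by
  induction fuel generalizing j t with
  | zero =>
    simp at hjm
    subst hjm
    simp [subRoutineLoop]
    ring
  | succ fuel ih =>
    have hlt : j < m := by push_cast at hjm ⊢; omega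
    rw [subRoutineLoop, if_pos hlt, foldl_add_const]
    have hlen : ((PySem.List.pyRange m (j - 1) (-1)).length : Int) = m - j + 1 := by
      rw [PySem.List.length_pyRange_neg_one]
      push_cast at hjm ⊢
      omega
    have ih' := ih (j + 1) (t + j * ((PySem.List.pyRange m (j - 1) (-1)).length : Int))
      (by omega) (by push_cast at hjm ⊢; omega)
    rw [hlen] at ih' ⊢
    linear_combination ih'

theorem subRoutine_eq (m : Int) : subRoutine m = subRoutine_alt m := by
  unfold subRoutine subRoutine_alt
  by_cases hm : m ≤ 0
  · have : m.toNat = 0 := Int.toNat_of_nonpos hm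
    rw [this, if_pos hm]
    rfl
  · rw [if_neg hm]
    push Not at hm
    have hfuel : (0 : Int) + (m.toNat : Int) = m := by
      simp [Int.toNat_of_nonneg hm.le]
    have h := subRoutineLoop_invariant m m.toNat 0 m le_rfl hfuel
    have hdiv : PySem.Int.floordiv (m * (m - 1) * (m + 4)) 6
        = subRoutineLoop m m.toNat 0 m - m := by
      rw [show m * (m - 1) * (m + 4) = 6 * (subRoutineLoop m m.toNat 0 m - m) by
        linear_combination -h]
      simp [PySem.Int.floordiv]
    omega

-- ===== VERDICT (by name: the statement is the Claim_ definition above) =====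
theorem subRoutine_spec : Claim_equal_subRoutine := by
  intro m _
  exact subRoutine_eq m
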